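-- pv_equiv track=rewrite | github.com/haticeakkus/haticeakkus.github.io | Sprint3/SyllabusScheduler.py | professor_has_two_exams_at_same_time
-- ===== SOURCE A (Python) =====
-- def professor_has_two_exams_at_same_time(professor_name, schedule):
--     """
--     Checks if a professor has two exams at the same time
--
--     Parameters
--     ----------
--     professor_name: str
--         The name of the professor
--     schedule: dict
--         The schedule
--
--     Returns
--     -------
--     count: int
--         The count of the exams at the same time
--     conflict_lecturer_infos: list
--         The list of conflict lecturer infos
--     """
--
--     count = 0
--     info = []
--     conflict_lecturer_infos = []
--
--     for room in schedule:
--         for day in schedule[room]: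
--             for time in schedule[room][day]:
--                 if schedule[room][day][time]["lecturer"] == professor_name:
--                     info.append([professor_name,room, day, time, schedule[room][day][time]["course"], schedule[room][day][time]["number of student"], schedule[room][day][time]["class"], schedule[room][day][time]["end time"], schedule[room][day][time]["department"]])
--
--     # find the exam at the same time in different room
--     for i in range(len(info)):
--         for j in range(i+1, len(info)):
--             if info[i][2] == info[j][2] and info[i][3] == info[j][3] and info[i][4] != info[j][4]:
--                 count+=1
--                 conflict_lecturer_infos.append(info[i])
--                 conflict_lecturer_infos.append(info[j])
--
--     return count, conflict_lecturer_infos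
-- ===== SOURCE B (Python) =====
-- def professor_has_two_exams_at_same_time(professor_name, schedule):
--     # One pass over the schedule builds the professor's exam rows; a (day, time) -> positions
--     # index then replaces the quadratic all-pairs scan of the conflict search.
--     info = [[professor_name, room, day, time, exam["course"], exam["number of student"],
--              exam["class"], exam["end time"], exam["department"]]
--             for room, days in schedule.items()
--             for day, times in days.items()
--             for time, exam in times.items()
--             if exam["lecturer"] == professor_name]
--
--     idx = {}
--     for p, entry in enumerate(info):
--         idx.setdefault((entry[2], entry[3]), []).append(p)
--
--     count = 0
--     conflict_lecturer_infos = []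
--     for i, entry in enumerate(info):
--         for j in idx[(entry[2], entry[3])]:
--             if j > i and entry[4] != info[j][4]:
--                 count += 1
--                 conflict_lecturer_infos.append(entry)
--                 conflict_lecturer_infos.append(info[j])
--     return count, conflict_lecturer_infos
-- ===== Notes on version B (the rewrite author's own statement) =====
-- stated objective: alternative
-- what changed: B builds a (day,time)->positions index in one pass and scans each entry's bucket instead of A's all-pairs double loop over the collected exams, and collects the professor's rows with a comprehension over dict items instead of key-indexed nested lookups.
import Mathlib
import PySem

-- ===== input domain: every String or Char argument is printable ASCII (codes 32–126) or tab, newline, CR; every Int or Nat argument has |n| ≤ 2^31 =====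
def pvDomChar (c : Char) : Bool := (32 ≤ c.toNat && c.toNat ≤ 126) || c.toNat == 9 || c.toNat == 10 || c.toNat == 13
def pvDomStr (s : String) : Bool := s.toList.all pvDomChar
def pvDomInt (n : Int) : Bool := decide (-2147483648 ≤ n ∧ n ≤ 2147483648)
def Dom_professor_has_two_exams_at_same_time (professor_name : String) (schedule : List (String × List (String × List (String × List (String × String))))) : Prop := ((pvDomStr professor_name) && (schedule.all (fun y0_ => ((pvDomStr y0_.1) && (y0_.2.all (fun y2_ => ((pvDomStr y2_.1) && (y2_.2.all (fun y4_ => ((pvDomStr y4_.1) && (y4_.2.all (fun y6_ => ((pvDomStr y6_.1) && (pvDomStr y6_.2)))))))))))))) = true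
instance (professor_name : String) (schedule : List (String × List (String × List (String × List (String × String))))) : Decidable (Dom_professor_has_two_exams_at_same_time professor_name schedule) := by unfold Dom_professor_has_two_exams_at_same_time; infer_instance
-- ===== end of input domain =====

-- B replaces the quadratic all-pairs conflict scan by a (day,time)->positions index built in one
-- pass, and collects the professor's rows by a comprehension over the dict items; return value only.

-- ===== PORT A =====
-- dict lookups are ported with getD and a default; exact because Pre_ guarantees every key a
-- performed lookup uses is present and keys at each dict level are unique.
def pvA_info (professor_name : String) (schedule : List (String × List (String × List (String × List (String × String))))) : List (List String) :=
  let sd := PySem.Dict.mk schedule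
  sd.keys.foldl (fun info room =>
    let days := PySem.Dict.mk (sd.getD room [])
    days.keys.foldl (fun info day =>
      let times := PySem.Dict.mk (days.getD day [])
      times.keys.foldl (fun info time =>
        let exam := PySem.Dict.mk (times.getD time [])
        if exam.getD "lecturer" "" = professor_name then
          info ++ [[professor_name, room, day, time, exam.getD "course" "",
                    exam.getD "number of student" "", exam.getD "class" "",
                    exam.getD "end time" "", exam.getD "department" ""]]
        else info) info) info) []

-- list indices in the pair scan come from range(...) and are always in range: pyGetD is exact there
def pvA_scan (info : List (List String)) : Int × List (List String) :=
  (PySem.List.pyRange 0 (info.length : Int) 1).foldl (fun st i =>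
    (PySem.List.pyRange (i + 1) (info.length : Int) 1).foldl (fun st j =>
      let ei := PySem.List.pyGetD info i []
      let ej := PySem.List.pyGetD info j []
      if PySem.List.pyGetD ei 2 "" = PySem.List.pyGetD ej 2 "" ∧
         PySem.List.pyGetD ei 3 "" = PySem.List.pyGetD ej 3 "" ∧
         PySem.List.pyGetD ei 4 "" ≠ PySem.List.pyGetD ej 4 "" then
        (st.1 + 1, st.2 ++ [ei] ++ [ej])
      else st) st) ((0 : Int), ([] : List (List String)))

def professor_has_two_exams_at_same_time (professor_name : String) (schedule : List (String × List (String × List (String × List (String × String))))) : Int × List (List String) :=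
  pvA_scan (pvA_info professor_name schedule)

-- ===== PORT B =====
def pvB_info (professor_name : String) (schedule : List (String × List (String × List (String × List (String × String))))) : List (List String) :=
  schedule.flatMap (fun rd =>
    rd.2.flatMap (fun dt =>
      (dt.2.filter (fun te => decide ((PySem.Dict.mk te.2).getD "lecturer" "" = professor_name))).map (fun te =>
        let exam := PySem.Dict.mk te.2
        [professor_name, rd.1, dt.1, te.1, exam.getD "course" "",
         exam.getD "number of student" "", exam.getD "class" "",
         exam.getD "end time" "", exam.getD "department" ""])))

-- idx.setdefault(k, []).append(p)  ==  idx[k] = idx.get(k, []) + [p]  ==  Dict.modify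
def pvB_idx (info : List (List String)) : PySem.Dict (String × String) (List Int) :=
  (PySem.List.enumerate info).foldl (fun d pe =>
    d.modify (PySem.List.pyGetD pe.2 2 "", PySem.List.pyGetD pe.2 3 "") [] (fun b => b ++ [pe.1]))
    PySem.Dict.empty

def pvB_scan (info : List (List String)) : Int × List (List String) :=
  let idx := pvB_idx info
  (PySem.List.enumerate info).foldl (fun st pe =>
    (idx.getD (PySem.List.pyGetD pe.2 2 "", PySem.List.pyGetD pe.2 3 "") []).foldl (fun st j =>
      if j > pe.1 ∧ PySem.List.pyGetD pe.2 4 "" ≠ PySem.List.pyGetD (PySem.List.pyGetD info j []) 4 "" then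
        (st.1 + 1, st.2 ++ [pe.2] ++ [PySem.List.pyGetD info j []])
      else st) st) ((0 : Int), ([] : List (List String)))

def professor_has_two_exams_at_same_time_alt (professor_name : String) (schedule : List (String × List (String × List (String × List (String × String))))) : Int × List (List String) :=
  pvB_scan (pvB_info professor_name schedule)

-- ===== PRECONDITION & SPEC =====
-- Pre_ excludes inputs on which A raises KeyError (a missing "lecturer" key, or a missing exam
-- field on an exam taught by the professor) and association lists with duplicate keys at some
-- dict level, which a Python dict cannot represent.
def Pre_professor_has_two_exams_at_same_time (professor_name : String) (schedule : List (String × List (String × List (String × List (String × String))))) : Prop :=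
  (schedule.map Prod.fst).Nodup ∧
  ∀ rd ∈ schedule, (rd.2.map Prod.fst).Nodup ∧
    ∀ dt ∈ rd.2, (dt.2.map Prod.fst).Nodup ∧
      ∀ te ∈ dt.2, (te.2.map Prod.fst).Nodup ∧
        "lecturer" ∈ te.2.map Prod.fst ∧
        ((PySem.Dict.mk te.2).getD "lecturer" "" = professor_name →
          ∀ k ∈ ["course", "number of student", "class", "end time", "department"], k ∈ te.2.map Prod.fst)

instance (professor_name : String) (schedule : List (String × List (String × List (String × List (String × String))))) : Decidable (Pre_professor_has_two_exams_at_same_time professor_name schedule) := by unfold Pre_professor_has_two_exams_at_same_time; infer_instance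

def pvWitness_professor_has_two_exams_at_same_time : String × (List (String × List (String × List (String × List (String × String))))) :=
  ("P", [("R1", [("Mon", [("9", [("lecturer", "P"), ("course", "C1"), ("number of student", "30"), ("class", "A"), ("end time", "10"), ("department", "CS")])])])])

def Spec_professor_has_two_exams_at_same_time (professor_name : String) (schedule : List (String × List (String × List (String × List (String × String))))) (out : Int × List (List String)) : Prop := out = professor_has_two_exams_at_same_time_alt professor_name schedule
instance (professor_name : String) (schedule : List (String × List (String × List (String × List (String × String))))) (out : Int × List (List String)) : Decidable (Spec_professor_has_two_exams_at_same_time professor_name schedule out) := by unfold Spec_professor_has_two_exams_at_same_time; infer_instance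

-- ===== CLAIM (what is proved, stated in full; the proofs are below) =====
def Claim_equal_professor_has_two_exams_at_same_time : Prop := ∀ (professor_name : String) (schedule : List (String × List (String × List (String × List (String × String))))), Dom_professor_has_two_exams_at_same_time professor_name schedule → Pre_professor_has_two_exams_at_same_time professor_name schedule → Spec_professor_has_two_exams_at_same_time professor_name schedule (professor_has_two_exams_at_same_time professor_name schedule)

-- ===== LEMMAS AND PROOFS =====

-- a fold over the keys of a Nodup dict, looking each key up, is a fold over its items
theorem pv_foldl_keys_getD {ν β : Type} (d : PySem.Dict String ν) (hnd : d.keys.Nodup) (dflt : ν)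
    (g : β → String → ν → β) (init : β) :
    d.keys.foldl (fun acc k => g acc k (d.getD k dflt)) init
      = d.items.foldl (fun acc kv => g acc kv.1 kv.2) init := by
  rw [PySem.Dict.items_eq_map_keys d hnd dflt, List.foldl_map]

theorem pv_foldl_append_eq_flatMap {α β : Type} (l : List α) (f : α → List β) (acc : List β) :
    l.foldl (fun a x => a ++ f x) acc = acc ++ l.flatMap f := by
  induction l generalizing acc with
  | nil => simp
  | cons x xs ih => simp [ih, List.append_assoc]

theorem pv_flatMap_eq_foldl {α β : Type} (l : List α) (f : α → List β) :
    l.flatMap f = l.foldl (fun a x => a ++ f x) [] := by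
  rw [pv_foldl_append_eq_flatMap, List.nil_append]

theorem pv_info_eq (professor_name : String) (schedule : List (String × List (String × List (String × List (String × String)))))
    (h : Pre_professor_has_two_exams_at_same_time professor_name schedule) :
    pvA_info professor_name schedule = pvB_info professor_name schedule := by
  obtain ⟨h1, h2⟩ := h
  simp only [pvA_info, pvB_info]
  rw [pv_foldl_keys_getD (PySem.Dict.mk schedule) h1 []
      (fun info room days =>
        List.foldl (fun info day =>
          List.foldl (fun info time =>
            if (PySem.Dict.mk ((PySem.Dict.mk ((PySem.Dict.mk days).getD day [])).getD time [])).getD "lecturer" "" = professor_name then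
              info ++ [[professor_name, room, day, time, (PySem.Dict.mk ((PySem.Dict.mk ((PySem.Dict.mk days).getD day [])).getD time [])).getD "course" "", (PySem.Dict.mk ((PySem.Dict.mk ((PySem.Dict.mk days).getD day [])).getD time [])).getD "number of student" "", (PySem.Dict.mk ((PySem.Dict.mk ((PySem.Dict.mk days).getD day [])).getD time [])).getD "class" "", (PySem.Dict.mk ((PySem.Dict.mk ((PySem.Dict.mk days).getD day [])).getD time [])).getD "end time" "", (PySem.Dict.mk ((PySem.Dict.mk ((PySem.Dict.mk days).getD day [])).getD time [])).getD "department" ""]]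
            else info)
            info (PySem.Dict.mk ((PySem.Dict.mk days).getD day [])).keys)
          info (PySem.Dict.mk days).keys) []]
  rw [pv_flatMap_eq_foldl]
  refine PySem.List.foldl_congr_mem' _ _ _ _ ?_
  intro rd hrd acc
  obtain ⟨hnd2, h3⟩ := h2 rd hrd
  show List.foldl _ acc (PySem.Dict.mk rd.2).keys = _
  rw [pv_foldl_keys_getD (PySem.Dict.mk rd.2) hnd2 []
      (fun info day times =>
          List.foldl (fun info time =>
            if (PySem.Dict.mk ((PySem.Dict.mk times).getD time [])).getD "lecturer" "" = professor_name then
              info ++ [[professor_name, rd.1, day, time, (PySem.Dict.mk ((PySem.Dict.mk times).getD time [])).getD "course" "", (PySem.Dict.mk ((PySem.Dict.mk times).getD time [])).getD "number of student" "", (PySem.Dict.mk ((PySem.Dict.mk times).getD time [])).getD "class" "", (PySem.Dict.mk ((PySem.Dict.mk times).getD time [])).getD "end time" "", (PySem.Dict.mk ((PySem.Dict.mk times).getD time [])).getD "department" ""]]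
            else info)
            info (PySem.Dict.mk times).keys) acc]
  rw [← pv_foldl_append_eq_flatMap]
  refine PySem.List.foldl_congr_mem' _ _ _ _ ?_
  intro dt hdt acc
  obtain ⟨hnd3, h4⟩ := h3 dt hdt
  show List.foldl _ acc (PySem.Dict.mk dt.2).keys = _
  rw [pv_foldl_keys_getD (PySem.Dict.mk dt.2) hnd3 []
      (fun info time exam =>
            if (PySem.Dict.mk exam).getD "lecturer" "" = professor_name then
              info ++ [[professor_name, rd.1, dt.1, time, (PySem.Dict.mk exam).getD "course" "", (PySem.Dict.mk exam).getD "number of student" "", (PySem.Dict.mk exam).getD "class" "", (PySem.Dict.mk exam).getD "end time" "", (PySem.Dict.mk exam).getD "department" ""]]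
            else info) acc]
  rw [PySem.List.foldl_append_ite]

-- bucket characterisation of the index dict
theorem pv_idx_gen (l : List (Int × List String)) (d : PySem.Dict (String × String) (List Int)) (c : String × String) :
    (l.foldl (fun d pe => d.modify (PySem.List.pyGetD pe.2 2 "", PySem.List.pyGetD pe.2 3 "") [] (fun b => b ++ [pe.1])) d).getD c []
      = d.getD c [] ++ (l.filter
          (fun pe => decide ((PySem.List.pyGetD pe.2 2 "", PySem.List.pyGetD pe.2 3 "") = c))).map (·.1) := by
  induction l generalizing d with
  | nil => simp
  | cons a l ih =>
    simp only [List.foldl_cons, List.filter_cons, ih, PySem.Dict.getD_modify]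
    by_cases h : (PySem.List.pyGetD a.2 2 "", PySem.List.pyGetD a.2 3 "") = c
    · simp [h]
    · rw [if_neg (fun hc : c = _ => h hc.symm), if_neg (by simpa using h)]

theorem pv_idx_getD (info : List (List String)) (c : String × String) :
    (pvB_idx info).getD c []
      = ((PySem.List.enumerate info).filter
          (fun pe => decide ((PySem.List.pyGetD pe.2 2 "", PySem.List.pyGetD pe.2 3 "") = c))).map (·.1) := by
  unfold pvB_idx
  rw [pv_idx_gen]
  simp

theorem pv_scan_eq (info : List (List String)) : pvA_scan info = pvB_scan info := by
  unfold pvA_scan pvB_scan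
  rw [PySem.List.enumerate_eq_map_pyRange info ([] : List String), List.foldl_map]
  simp only [PySem.List.len_eq]
  refine PySem.List.foldl_congr_mem' _ _ _ _ ?_
  intro i hi st
  rw [PySem.List.mem_pyRange_one] at hi
  rw [pv_idx_getD, PySem.List.enumerate_eq_map_pyRange info ([] : List String),
      List.filter_map, List.map_map, PySem.List.len_eq]
  rw [PySem.List.foldl_ite_eq_foldl_filter, PySem.List.foldl_ite_eq_foldl_filter]
  congr 1
  simp only [Function.comp_def, List.map_id']
  apply Eq.symm
  rw [List.filter_filter]
  rw [PySem.List.pyRange_one_append 0 (i + 1) (info.length : Int) (by omega) (by omega),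
      List.filter_append]
  rw [List.filter_eq_nil_iff.mpr ?lo, List.nil_append]
  case lo =>
    intro j hj
    rw [PySem.List.mem_pyRange_one] at hj
    simp only [Bool.and_eq_true, decide_eq_true_eq, not_and]
    intro _ hgt
    omega
  refine List.filter_congr ?_
  intro j hj
  rw [PySem.List.mem_pyRange_one] at hj
  simp only [Prod.mk.injEq, ← Bool.decide_and, decide_eq_decide]
  constructor
  · rintro ⟨⟨_, h4⟩, h2, h3⟩
    exact ⟨h2.symm, h3.symm, h4⟩
  · rintro ⟨h2, h3, h4⟩
    exact ⟨⟨by omega, h4⟩, h2.symm, h3.symm⟩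

-- ===== VERDICT (by name: the statement is the Claim_ definition above) =====
theorem professor_has_two_exams_at_same_time_spec : Claim_equal_professor_has_two_exams_at_same_time := by
  intro pn sch _ hpre
  unfold Spec_professor_has_two_exams_at_same_time professor_has_two_exams_at_same_time professor_has_two_exams_at_same_time_alt
  rw [pv_info_eq pn sch hpre, pv_scan_eq]
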